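-- pv_equiv track=rewrite | github.com/grapheneaffiliate/h4-polytopic-attention | solve_b10.py | solve_6d0160f0
-- ===== SOURCE A (Python) =====
-- def solve_6d0160f0(grid):
--     out = [[0]*11 for _ in range(11)]
--     for r in range(11):
--         for c in range(11):
--             if r == 3 or r == 7 or c == 3 or c == 7:
--                 out[r][c] = 5
--     # Find block with value 4
--     for bi in range(3):
--         for bj in range(3):
--             r0, c0 = bi*4, bj*4
--             for r in range(3):
--                 for c in range(3):
--                     if grid[r0+r][c0+c] == 4:
--                         # local pos (r,c) = dest block pos
--                         dr0, dc0 = r*4, c*4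
--                         for rr in range(3):
--                             for cc in range(3):
--                                 out[dr0+rr][dc0+cc] = grid[r0+rr][c0+cc]
--                         return out
--     return out
-- ===== SOURCE B (Python) =====
-- def solve_6d0160f0(grid):
--     # Locate the marker with one flat loop over a single index, decoding the
--     # block-major (bi, bj, r, c) coordinates arithmetically.
--     hit = None
--     for k in range(81):
--         bi, bj, r, c = k // 27, k // 9 % 3, k // 3 % 3, k % 3
--         if grid[bi * 4 + r][bj * 4 + c] == 4:
--             hit = (bi, bj, r, c)
--             break
--
--     # Every output cell is a pure closed-form function of (R, C) and the marker:
--     # separators by R%4/C%4, the relocated block by //4 and %4 arithmetic.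
--     def cell(R, C):
--         if R % 4 == 3 or C % 4 == 3:
--             return 5
--         if hit is not None:
--             bi, bj, r, c = hit
--             if R // 4 == r and C // 4 == c:
--                 return grid[bi * 4 + R % 4][bj * 4 + C % 4]
--         return 0
--
--     return [[cell(R, C) for C in range(11)] for R in range(11)]
-- ===== Notes on version B (the rewrite author's own statement) =====
-- stated objective: alternative
-- what changed: B replaces A's mutate-and-copy structure (draw separators cell by cell into a mutable grid, 4-deep block-major search nest with early return, explicit 3x3 copy loops) by a single flat loop over one index k<81 that decodes (bi,bj,r,c) arithmetically, plus a pure per-cell closed-form comprehension computing each output cell from the marker via //4 and %4 block mapping, with no mutation and no copy loop.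
import Mathlib
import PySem

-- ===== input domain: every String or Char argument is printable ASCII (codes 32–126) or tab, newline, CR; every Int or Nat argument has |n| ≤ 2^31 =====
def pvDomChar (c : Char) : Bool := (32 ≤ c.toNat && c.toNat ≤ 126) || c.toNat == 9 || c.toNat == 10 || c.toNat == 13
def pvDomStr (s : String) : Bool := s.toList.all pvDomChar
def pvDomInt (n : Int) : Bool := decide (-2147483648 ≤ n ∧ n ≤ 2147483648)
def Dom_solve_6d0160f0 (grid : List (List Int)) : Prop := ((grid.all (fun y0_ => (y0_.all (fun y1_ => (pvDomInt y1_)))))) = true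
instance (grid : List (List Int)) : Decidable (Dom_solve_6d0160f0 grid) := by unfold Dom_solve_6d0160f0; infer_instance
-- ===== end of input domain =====

-- B replaces A's mutate-and-copy nest by one flat arithmetically-decoded marker scan
-- plus a pure per-cell closed-form construction (block mapping by /4 and %4, no
-- mutation, no copy loop); objective: alternative structure of the same cost.

-- grid[r][c] with the indices known to be in range on the admitted inputs
def pvGet2 (g : List (List Int)) (r c : Nat) : Int := (g.getD r []).getD c 0

-- ===== PORT A =====
-- out[r][c] = v
def pvSet2 (g : List (List Int)) (r c : Nat) (v : Int) : List (List Int) :=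
  g.set r ((g.getD r []).set c v)

-- A's first two loops: the 11×11 zero grid with the separator lines drawn cell by cell
def aSep : List (List Int) :=
  (List.range 11).foldl (fun o r =>
    (List.range 11).foldl (fun o c =>
      if r = 3 ∨ r = 7 ∨ c = 3 ∨ c = 7 then pvSet2 o r c 5 else o) o)
    (List.replicate 11 (List.replicate 11 0))

-- A's early-return 4-deep search nest (findSome? = first loop body that returns)
def aSearch (grid : List (List Int)) : Option (Nat × Nat × Nat × Nat) :=
  (List.range 3).findSome? fun bi =>
    (List.range 3).findSome? fun bj =>
      (List.range 3).findSome? fun r =>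
        (List.range 3).findSome? fun c =>
          if pvGet2 grid (bi*4+r) (bj*4+c) == 4 then some (bi, bj, r, c) else none

def solve_6d0160f0 (grid : List (List Int)) : List (List Int) :=
  match aSearch grid with
  | some (bi, bj, r, c) =>
      (List.range 3).foldl (fun o rr =>
        (List.range 3).foldl (fun o cc =>
          pvSet2 o (r*4+rr) (c*4+cc) (pvGet2 grid (bi*4+rr) (bj*4+cc))) o) aSep
  | none => aSep

-- ===== PORT B =====
-- B's flat search loop: one index k < 81, block-major coordinates decoded by / and %
def bScan (grid : List (List Int)) : Option (Nat × Nat × Nat × Nat) :=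
  (List.range 81).findSome? fun k =>
    if pvGet2 grid ((k / 27) * 4 + (k / 3 % 3)) ((k / 9 % 3) * 4 + (k % 3)) == 4
    then some (k / 27, k / 9 % 3, k / 3 % 3, k % 3) else none

-- B's per-cell closed form `cell(R, C)`
def bCell (grid : List (List Int)) (hit : Option (Nat × Nat × Nat × Nat)) (R C : Nat) : Int :=
  if R % 4 = 3 ∨ C % 4 = 3 then 5
  else
    match hit with
    | none => 0
    | some (bi, bj, r, c) =>
        if R / 4 = r ∧ C / 4 = c then pvGet2 grid (bi*4 + R%4) (bj*4 + C%4)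
        else 0

-- B's output comprehension [[cell(R,C) for C in range(11)] for R in range(11)]
def pvMk (F : Nat → Nat → Int) : List (List Int) :=
  (List.range 11).map fun R => (List.range 11).map fun C => F R C

def solve_6d0160f0_alt (grid : List (List Int)) : List (List Int) :=
  pvMk (bCell grid (bScan grid))

-- ===== PRECONDITION & SPEC =====
-- is the scanned cell (q.1*4+q.2.2.1, q.2.1*4+q.2.2.2) inside the grid?
def pvCellOK (grid : List (List Int)) (q : Nat × Nat × Nat × Nat) : Prop :=
  q.1*4 + q.2.2.1 < grid.length ∧ q.2.1*4 + q.2.2.2 < (grid.getD (q.1*4 + q.2.2.1) []).length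

-- the scanned cell is in range and holds a 4
def pvIsFour (grid : List (List Int)) (q : Nat × Nat × Nat × Nat) : Prop :=
  pvCellOK grid q ∧ pvGet2 grid (q.1*4 + q.2.2.1) (q.2.1*4 + q.2.2.2) = 4

-- the whole 3×3 block of q is inside the grid
def pvBlockOK (grid : List (List Int)) (q : Nat × Nat × Nat × Nat) : Prop :=
  ∀ i < 3, ∀ j < 3, pvCellOK grid (q.1, q.2.1, i, j)

-- A's block-major scan order, as the list of visited (bi, bj, r, c)
def pvQuads : List (Nat × Nat × Nat × Nat) :=
  (List.range 3).flatMap fun bi => (List.range 3).flatMap fun bj =>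
    (List.range 3).flatMap fun r => (List.range 3).map fun c => (bi, bj, r, c)

-- Pre_ is exactly the inputs on which Python A returns normally (anything else raises
-- IndexError): either every cell the block-major scan visits is in range, or the scan
-- meets a 4 — whose whole source block is in range — before its first out-of-range access.
def Pre_solve_6d0160f0 (grid : List (List Int)) : Prop :=
  (∀ q ∈ pvQuads, pvCellOK grid q) ∨
  ∃ n < pvQuads.length, pvIsFour grid (pvQuads.getD n (0,0,0,0)) ∧
    pvBlockOK grid (pvQuads.getD n (0,0,0,0)) ∧
    ∀ m < n, pvCellOK grid (pvQuads.getD m (0,0,0,0)) ∧ ¬ pvIsFour grid (pvQuads.getD m (0,0,0,0))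
instance (grid : List (List Int)) : Decidable (Pre_solve_6d0160f0 grid) := by
  unfold Pre_solve_6d0160f0 pvBlockOK pvIsFour pvCellOK; infer_instance

def pvWitness_solve_6d0160f0 : List (List Int) :=
  List.replicate 11 (List.replicate 11 0)

def Spec_solve_6d0160f0 (grid : List (List Int)) (out : List (List Int)) : Prop := out = solve_6d0160f0_alt grid
instance (grid : List (List Int)) (out : List (List Int)) : Decidable (Spec_solve_6d0160f0 grid out) := by unfold Spec_solve_6d0160f0; infer_instance

-- ===== CLAIM (what is proved, stated in full; the proofs are below) =====
def Claim_equal_solve_6d0160f0 : Prop := ∀ (grid : List (List Int)), Dom_solve_6d0160f0 grid → Pre_solve_6d0160f0 grid → Spec_solve_6d0160f0 grid (solve_6d0160f0 grid)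

-- ===== LEMMAS AND PROOFS =====

-- findSome? distributes over flatMap
theorem pv_findSome?_flatMap {α β γ : Type} (l : List α) (g : α → List β) (f : β → Option γ) :
    (l.flatMap g).findSome? f = l.findSome? (fun a => (g a).findSome? f) := by
  induction l with
  | nil => rfl
  | cons a l ih =>
      simp [List.flatMap_cons, List.findSome?_append, List.findSome?_cons, ih]
      cases (g a).findSome? f <;> simp

-- the decoded flat index k < 81 enumerates A's block-major quads in order
theorem pv_range81_dec :
    (List.range 81).map (fun k => (k / 27, k / 9 % 3, k / 3 % 3, k % 3)) = pvQuads := by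
  decide

-- B's flat decoded loop finds exactly what A's early-return nest finds
theorem pv_scan_eq (grid : List (List Int)) : bScan grid = aSearch grid := by
  have hq : bScan grid = pvQuads.findSome? fun q =>
      if pvGet2 grid (q.1*4 + q.2.2.1) (q.2.1*4 + q.2.2.2) == 4 then some q else none := by
    rw [← pv_range81_dec, List.findSome?_map]
    rfl
  rw [hq]
  unfold pvQuads aSearch
  simp only [pv_findSome?_flatMap, List.findSome?_map]
  rfl

-- A's search yields an in-bounds quad
theorem aSearch_some (grid : List (List Int)) (bi bj r c : Nat)
    (h : aSearch grid = some (bi, bj, r, c)) :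
    bi < 3 ∧ bj < 3 ∧ r < 3 ∧ c < 3 := by
  rw [aSearch] at h
  obtain ⟨bi', hbi, h⟩ := List.exists_of_findSome?_eq_some h
  obtain ⟨bj', hbj, h⟩ := List.exists_of_findSome?_eq_some h
  obtain ⟨r', hr, h⟩ := List.exists_of_findSome?_eq_some h
  obtain ⟨c', hc, h⟩ := List.exists_of_findSome?_eq_some h
  rw [List.mem_range] at hbi hbj hr hc
  by_cases h4 : pvGet2 grid (bi'*4+r') (bj'*4+c') == 4
  · rw [if_pos h4] at h
    injection h with h
    injection h with e1 h
    injection h with e2 h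
    injection h with e3 e4
    subst e1; subst e2; subst e3; subst e4
    exact ⟨hbi, hbj, hr, hc⟩
  · rw [if_neg h4] at h; simp at h

-- the separator pattern, as a per-cell function
def pvSepF (R C : Nat) : Int := if R = 3 ∨ R = 7 ∨ C = 3 ∨ C = 7 then 5 else 0

-- a point update of a per-cell function
def pvUpd (F : Nat → Nat → Int) (d k : Nat) (v : Int) : Nat → Nat → Int :=
  fun R C => if R = d ∧ C = k then v else F R C

theorem pv_aSep_eq : aSep = pvMk pvSepF := by decide

theorem pv_getD_map_range (f : Nat → List Int) (d : Nat) (hd : d < 11) :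
    (((List.range 11).map f).getD d []) = f d := by
  rw [List.getD_eq_getElem?_getD, List.getElem?_map]
  rw [List.getElem?_range hd]
  rfl

-- setting one cell of a comprehension grid is a point update of its function
theorem pvSet2_mk (F : Nat → Nat → Int) (d k : Nat) (v : Int)
    (hd : d < 11) :
    pvSet2 (pvMk F) d k v = pvMk (pvUpd F d k v) := by
  unfold pvSet2 pvMk
  rw [pv_getD_map_range _ d hd]
  apply List.ext_getElem
  · simp
  · intro i h1 h2
    simp only [List.getElem_set, List.getElem_map, List.getElem_range]
    by_cases hdi : d = i
    · rw [if_pos hdi]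
      apply List.ext_getElem
      · simp
      · intro j h3 h4
        simp only [List.getElem_set, List.getElem_map, List.getElem_range, pvUpd]
        by_cases hkj : k = j
        · rw [if_pos hkj, if_pos ⟨hdi.symm, hkj.symm⟩]
        · rw [if_neg hkj, if_neg (fun hx => hkj hx.2.symm), hdi]
    · rw [if_neg hdi]
      apply List.map_congr_left
      intro j hj
      simp only [pvUpd]
      rw [if_neg (fun hx => hdi hx.1.symm)]

theorem pvMk_congr (F G : Nat → Nat → Int)
    (h : ∀ R < 11, ∀ C < 11, F R C = G R C) : pvMk F = pvMk G := by
  unfold pvMk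
  apply List.map_congr_left
  intro R hR
  apply List.map_congr_left
  intro C hC
  exact h R (List.mem_range.mp hR) C (List.mem_range.mp hC)

-- one output cell of A's copy phase, as B's closed form
theorem pv_cell_eq (grid : List (List Int)) (bi bj r c R C : Nat)
    (hr : r < 3) (hc : c < 3) (hR : R < 11) (hC : C < 11) :
    (pvUpd (pvUpd (pvUpd (pvUpd (pvUpd (pvUpd (pvUpd (pvUpd (pvUpd pvSepF (r*4+0) (c*4+0) (pvGet2 grid (bi*4+0) (bj*4+0))) (r*4+0) (c*4+1) (pvGet2 grid (bi*4+0) (bj*4+1))) (r*4+0) (c*4+2) (pvGet2 grid (bi*4+0) (bj*4+2))) (r*4+1) (c*4+0) (pvGet2 grid (bi*4+1) (bj*4+0))) (r*4+1) (c*4+1) (pvGet2 grid (bi*4+1) (bj*4+1))) (r*4+1) (c*4+2) (pvGet2 grid (bi*4+1) (bj*4+2))) (r*4+2) (c*4+0) (pvGet2 grid (bi*4+2) (bj*4+0))) (r*4+2) (c*4+1) (pvGet2 grid (bi*4+2) (bj*4+1))) (r*4+2) (c*4+2) (pvGet2 grid (bi*4+2) (bj*4+2))) R C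
    = bCell grid (some (bi, bj, r, c)) R C := by
  simp only [pvUpd, bCell]
  by_cases hsep : R % 4 = 3 ∨ C % 4 = 3
  · rw [if_neg (show ¬(R = r*4+2 ∧ C = c*4+2) by omega)]
    rw [if_neg (show ¬(R = r*4+2 ∧ C = c*4+1) by omega)]
    rw [if_neg (show ¬(R = r*4+2 ∧ C = c*4+0) by omega)]
    rw [if_neg (show ¬(R = r*4+1 ∧ C = c*4+2) by omega)]
    rw [if_neg (show ¬(R = r*4+1 ∧ C = c*4+1) by omega)]
    rw [if_neg (show ¬(R = r*4+1 ∧ C = c*4+0) by omega)]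
    rw [if_neg (show ¬(R = r*4+0 ∧ C = c*4+2) by omega)]
    rw [if_neg (show ¬(R = r*4+0 ∧ C = c*4+1) by omega)]
    rw [if_neg (show ¬(R = r*4+0 ∧ C = c*4+0) by omega)]
    rw [if_pos hsep]
    simp only [pvSepF]
    rw [if_pos (by omega)]
  · by_cases hdst : R / 4 = r ∧ C / 4 = c
    · obtain ⟨hd1, hd2⟩ := hdst
      rw [if_neg hsep, if_pos (show R / 4 = r ∧ C / 4 = c from ⟨hd1, hd2⟩)]
      rcases (show R % 4 = 0 ∨ R % 4 = 1 ∨ R % 4 = 2 by omega) with hp | hp | hp <;>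
        rcases (show C % 4 = 0 ∨ C % 4 = 1 ∨ C % 4 = 2 by omega) with hq | hq | hq
      · rw [if_neg (show ¬(R = r*4+2 ∧ C = c*4+2) by omega)]
        rw [if_neg (show ¬(R = r*4+2 ∧ C = c*4+1) by omega)]
        rw [if_neg (show ¬(R = r*4+2 ∧ C = c*4+0) by omega)]
        rw [if_neg (show ¬(R = r*4+1 ∧ C = c*4+2) by omega)]
        rw [if_neg (show ¬(R = r*4+1 ∧ C = c*4+1) by omega)]
        rw [if_neg (show ¬(R = r*4+1 ∧ C = c*4+0) by omega)]
        rw [if_neg (show ¬(R = r*4+0 ∧ C = c*4+2) by omega)]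
        rw [if_neg (show ¬(R = r*4+0 ∧ C = c*4+1) by omega)]
        rw [if_pos (show R = r*4+0 ∧ C = c*4+0 by omega)]
        rw [hp, hq]
      · rw [if_neg (show ¬(R = r*4+2 ∧ C = c*4+2) by omega)]
        rw [if_neg (show ¬(R = r*4+2 ∧ C = c*4+1) by omega)]
        rw [if_neg (show ¬(R = r*4+2 ∧ C = c*4+0) by omega)]
        rw [if_neg (show ¬(R = r*4+1 ∧ C = c*4+2) by omega)]
        rw [if_neg (show ¬(R = r*4+1 ∧ C = c*4+1) by omega)]
        rw [if_neg (show ¬(R = r*4+1 ∧ C = c*4+0) by omega)]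
        rw [if_neg (show ¬(R = r*4+0 ∧ C = c*4+2) by omega)]
        rw [if_pos (show R = r*4+0 ∧ C = c*4+1 by omega)]
        rw [hp, hq]
      · rw [if_neg (show ¬(R = r*4+2 ∧ C = c*4+2) by omega)]
        rw [if_neg (show ¬(R = r*4+2 ∧ C = c*4+1) by omega)]
        rw [if_neg (show ¬(R = r*4+2 ∧ C = c*4+0) by omega)]
        rw [if_neg (show ¬(R = r*4+1 ∧ C = c*4+2) by omega)]
        rw [if_neg (show ¬(R = r*4+1 ∧ C = c*4+1) by omega)]
        rw [if_neg (show ¬(R = r*4+1 ∧ C = c*4+0) by omega)]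
        rw [if_pos (show R = r*4+0 ∧ C = c*4+2 by omega)]
        rw [hp, hq]
      · rw [if_neg (show ¬(R = r*4+2 ∧ C = c*4+2) by omega)]
        rw [if_neg (show ¬(R = r*4+2 ∧ C = c*4+1) by omega)]
        rw [if_neg (show ¬(R = r*4+2 ∧ C = c*4+0) by omega)]
        rw [if_neg (show ¬(R = r*4+1 ∧ C = c*4+2) by omega)]
        rw [if_neg (show ¬(R = r*4+1 ∧ C = c*4+1) by omega)]
        rw [if_pos (show R = r*4+1 ∧ C = c*4+0 by omega)]
        rw [hp, hq]
      · rw [if_neg (show ¬(R = r*4+2 ∧ C = c*4+2) by omega)]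
        rw [if_neg (show ¬(R = r*4+2 ∧ C = c*4+1) by omega)]
        rw [if_neg (show ¬(R = r*4+2 ∧ C = c*4+0) by omega)]
        rw [if_neg (show ¬(R = r*4+1 ∧ C = c*4+2) by omega)]
        rw [if_pos (show R = r*4+1 ∧ C = c*4+1 by omega)]
        rw [hp, hq]
      · rw [if_neg (show ¬(R = r*4+2 ∧ C = c*4+2) by omega)]
        rw [if_neg (show ¬(R = r*4+2 ∧ C = c*4+1) by omega)]
        rw [if_neg (show ¬(R = r*4+2 ∧ C = c*4+0) by omega)]
        rw [if_pos (show R = r*4+1 ∧ C = c*4+2 by omega)]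
        rw [hp, hq]
      · rw [if_neg (show ¬(R = r*4+2 ∧ C = c*4+2) by omega)]
        rw [if_neg (show ¬(R = r*4+2 ∧ C = c*4+1) by omega)]
        rw [if_pos (show R = r*4+2 ∧ C = c*4+0 by omega)]
        rw [hp, hq]
      · rw [if_neg (show ¬(R = r*4+2 ∧ C = c*4+2) by omega)]
        rw [if_pos (show R = r*4+2 ∧ C = c*4+1 by omega)]
        rw [hp, hq]
      · rw [if_pos (show R = r*4+2 ∧ C = c*4+2 by omega)]
        rw [hp, hq]
    · rw [if_neg hsep, if_neg hdst]
      rw [if_neg (show ¬(R = r*4+2 ∧ C = c*4+2) by omega)]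
      rw [if_neg (show ¬(R = r*4+2 ∧ C = c*4+1) by omega)]
      rw [if_neg (show ¬(R = r*4+2 ∧ C = c*4+0) by omega)]
      rw [if_neg (show ¬(R = r*4+1 ∧ C = c*4+2) by omega)]
      rw [if_neg (show ¬(R = r*4+1 ∧ C = c*4+1) by omega)]
      rw [if_neg (show ¬(R = r*4+1 ∧ C = c*4+0) by omega)]
      rw [if_neg (show ¬(R = r*4+0 ∧ C = c*4+2) by omega)]
      rw [if_neg (show ¬(R = r*4+0 ∧ C = c*4+1) by omega)]
      rw [if_neg (show ¬(R = r*4+0 ∧ C = c*4+0) by omega)]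
      simp only [pvSepF]
      rw [if_neg (by omega)]

-- A's copy loop over the separator grid equals B's closed-form comprehension
theorem pv_copy_eq (grid : List (List Int)) (bi bj r c : Nat)
    (hr : r < 3) (hc : c < 3) :
    (List.range 3).foldl (fun o rr =>
        (List.range 3).foldl (fun o cc =>
          pvSet2 o (r*4+rr) (c*4+cc) (pvGet2 grid (bi*4+rr) (bj*4+cc))) o) aSep
      = pvMk (bCell grid (some (bi, bj, r, c))) := by
  have hre : List.range 3 = [0, 1, 2] := rfl
  rw [hre]
  simp only [List.foldl_cons, List.foldl_nil]
  rw [pv_aSep_eq]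
  rw [pvSet2_mk _ _ _ _ (by omega), pvSet2_mk _ _ _ _ (by omega),
    pvSet2_mk _ _ _ _ (by omega), pvSet2_mk _ _ _ _ (by omega),
    pvSet2_mk _ _ _ _ (by omega), pvSet2_mk _ _ _ _ (by omega),
    pvSet2_mk _ _ _ _ (by omega), pvSet2_mk _ _ _ _ (by omega),
    pvSet2_mk _ _ _ _ (by omega)]
  apply pvMk_congr
  intro R hR C hC
  exact pv_cell_eq grid bi bj r c R C hr hc hR hC

-- ===== VERDICT (by name: the statement is the Claim_ definition above) =====
theorem solve_6d0160f0_spec : Claim_equal_solve_6d0160f0 := by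
  intro grid _ _
  unfold Spec_solve_6d0160f0 solve_6d0160f0 solve_6d0160f0_alt
  rw [pv_scan_eq]
  cases hs : aSearch grid with
  | none =>
      rw [pv_aSep_eq]
      apply pvMk_congr
      intro R hR C hC
      simp only [pvSepF, bCell]
      split_ifs <;> omega
  | some q =>
      obtain ⟨bi, bj, r, c⟩ := q
      obtain ⟨-, -, hr, hc⟩ := aSearch_some grid bi bj r c hs
      exact pv_copy_eq grid bi bj r c hr hc
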